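-- pv_equiv track=rewrite | github.com/benjamincrom/baseball | get_xml_data.py | get_name_only
-- ===== SOURCE A (Python) =====
-- def get_name_only(player_str):
--     name_flag = False
--     player_name = None
--
--     for word in player_str.split():
--         if name_flag:
--             player_name += (' ' + word)
--         elif word[0].isupper():
--             player_name = word
--             name_flag = True
--
--     return player_name
-- ===== SOURCE B (Python) =====
-- def get_name_only(player_str):
--     words = player_str.split()
--     for i, word in enumerate(words):
--         if word[0].isupper():
--             return ' '.join(words[i:])
--     return None
-- ===== Notes on version B (the rewrite author's own statement) =====
-- stated objective: idiomatic
-- what changed: Replaces the flag-driven incremental string accumulation with a locate-then-join decomposition: find the first word starting with an uppercase letter and join it with the remaining words in one step.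
import Mathlib
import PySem

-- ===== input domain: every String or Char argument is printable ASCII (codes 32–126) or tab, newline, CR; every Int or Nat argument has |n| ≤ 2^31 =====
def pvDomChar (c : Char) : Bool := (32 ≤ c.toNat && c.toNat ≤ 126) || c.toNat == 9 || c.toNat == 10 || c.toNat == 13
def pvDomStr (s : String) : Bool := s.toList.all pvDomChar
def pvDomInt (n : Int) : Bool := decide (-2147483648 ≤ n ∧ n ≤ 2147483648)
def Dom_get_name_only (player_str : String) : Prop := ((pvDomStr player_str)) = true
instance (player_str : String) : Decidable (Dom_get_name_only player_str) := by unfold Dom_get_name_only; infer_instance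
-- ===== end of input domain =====

-- ===== PORT A =====
-- B: locate the first capitalized word, then join it with the rest in one step (idiomatic find-then-join instead of A's flag-driven accumulation).
-- A's `word[0]` would raise only on an empty word, which str.split() never produces, so `headD ' '` is exact here.
def pvStep (st : Bool × Option (List Char)) (w : List Char) : Bool × Option (List Char) :=
  if st.1 then (st.1, st.2.map (fun n => n ++ (' ' :: w)))
  else if PySem.Chars.isupper (w.headD ' ') then (true, some w)
  else st

def get_name_only (player_str : String) : Option String :=
  ((PySem.Chars.split₀ player_str.toList).foldl pvStep (false, none)).2.map String.mk

-- ===== PORT B =====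
def pvFindJoin : List (List Char) → Option String
  | [] => none
  | w :: ws =>
    if PySem.Chars.isupper (w.headD ' ') then
      some (String.mk (PySem.Chars.join [' '] (w :: ws)))
    else pvFindJoin ws

def get_name_only_alt (player_str : String) : Option String :=
  pvFindJoin (PySem.Chars.split₀ player_str.toList)

-- ===== PRECONDITION & SPEC =====
def Spec_get_name_only (player_str : String) (out : Option String) : Prop := out = get_name_only_alt player_str
instance (player_str : String) (out : Option String) : Decidable (Spec_get_name_only player_str out) := by unfold Spec_get_name_only; infer_instance

-- ===== CLAIM (what is proved, stated in full; the proofs are below) =====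
def Claim_equal_get_name_only : Prop := ∀ (player_str : String), Dom_get_name_only player_str → Spec_get_name_only player_str (get_name_only player_str)

-- ===== LEMMAS AND PROOFS =====

-- ===== VERDICT (by name: the statement is the Claim_ definition above) =====
lemma pv_join_glue (a b : List Char) (ws : List (List Char)) :
    PySem.Chars.join [' '] ((a ++ ' ' :: b) :: ws) = a ++ ' ' :: PySem.Chars.join [' '] (b :: ws) := by
  cases ws <;> simp [PySem.Chars.join, List.intercalate, List.intersperse]

lemma pv_join_cons (a b : List Char) (ws : List (List Char)) :
    PySem.Chars.join [' '] (a :: b :: ws) = a ++ ' ' :: PySem.Chars.join [' '] (b :: ws) := by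
  simp [PySem.Chars.join, List.intercalate, List.intersperse]

lemma pv_fold_true (ws : List (List Char)) (n : List Char) :
    (ws.foldl pvStep (true, some n)).2 = some (PySem.Chars.join [' '] (n :: ws)) := by
  induction ws generalizing n with
  | nil => simp [PySem.Chars.join, List.intercalate, List.intersperse]
  | cons w ws ih =>
    have hstep : pvStep (true, some n) w = (true, some (n ++ ' ' :: w)) := by
      simp [pvStep]
    rw [List.foldl_cons, hstep, ih, pv_join_glue, pv_join_cons]

lemma pv_fold_eq_find (ws : List (List Char)) :
    ((ws.foldl pvStep (false, none)).2).map String.mk = pvFindJoin ws := by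
  induction ws with
  | nil => rfl
  | cons w ws ih =>
    by_cases h : PySem.Chars.isupper (w.headD ' ') = true
    · have h' : PySem.Chars.isupper (w.head?.getD ' ') = true := by
        cases w <;> simpa using h
      have hstep : pvStep (false, none) w = (true, some w) := by
        simp [pvStep, h']
      rw [List.foldl_cons, hstep, pv_fold_true, pvFindJoin, if_pos h, Option.map_some]
    · have h' : PySem.Chars.isupper (w.head?.getD ' ') = false := by
        cases w <;> simpa using h
      have hstep : pvStep (false, none) w = (false, none) := by
        simp [pvStep, h']
      rw [List.foldl_cons, hstep, pvFindJoin, if_neg h, ih]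

theorem get_name_only_spec : Claim_equal_get_name_only := by
  intro s _
  unfold Spec_get_name_only get_name_only get_name_only_alt
  exact pv_fold_eq_find _
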